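-- pv_equiv track=rewrite | github.com/yastil01/Amazon_OA | shopping_patterns.py | getMinScore
-- ===== SOURCE A (Python) =====
-- def getMinScore(products_nodes, products_from, products_to):
--
--   import collections
--   map = collections.defaultdict(set)
--   for i in range(len(products_from)):
--       map[products_from[i]].add(products_to[i])
--       map[products_to[i]].add(products_from[i])
--
--   MinSum = float('inf')
--
--   for i in range(len(products_from)):
--       for node in products_from:
--           if node in map[products_from[i]] and node in map[products_to[i]]:
--               productSum = len(map[products_from[i]]) + len(map[products_to[i]]) + len(map[node]) - 6
--               MinSum = min(productSum, MinSum)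
--
--   return MinSum if MinSum < float('inf') else -1
-- ===== SOURCE B (Python) =====
-- def getMinScore(products_nodes, products_from, products_to):
--     # adjacency index built once; triangles enumerated per directed edge by
--     # neighbor-set intersection instead of scanning products_from per edge
--     adj = {}
--     for u, v in zip(products_from, products_to):
--         adj.setdefault(u, set()).add(v)
--         adj.setdefault(v, set()).add(u)
--     best = None
--     for u, nu in adj.items():
--         for v in nu:
--             nv = adj[v]
--             for w in nu & nv:
--                 s = len(nu) + len(nv) + len(adj[w]) - 6
--                 best = s if best is None else min(s, best)
--     return -1 if best is None else best
-- ===== Notes on version B (the rewrite author's own statement) =====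
-- stated objective: faster
-- what changed: B builds the adjacency index once and enumerates triangles by intersecting the neighbor sets of each edge's endpoints, instead of A's rescanning the whole products_from list for every edge.
import Mathlib
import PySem

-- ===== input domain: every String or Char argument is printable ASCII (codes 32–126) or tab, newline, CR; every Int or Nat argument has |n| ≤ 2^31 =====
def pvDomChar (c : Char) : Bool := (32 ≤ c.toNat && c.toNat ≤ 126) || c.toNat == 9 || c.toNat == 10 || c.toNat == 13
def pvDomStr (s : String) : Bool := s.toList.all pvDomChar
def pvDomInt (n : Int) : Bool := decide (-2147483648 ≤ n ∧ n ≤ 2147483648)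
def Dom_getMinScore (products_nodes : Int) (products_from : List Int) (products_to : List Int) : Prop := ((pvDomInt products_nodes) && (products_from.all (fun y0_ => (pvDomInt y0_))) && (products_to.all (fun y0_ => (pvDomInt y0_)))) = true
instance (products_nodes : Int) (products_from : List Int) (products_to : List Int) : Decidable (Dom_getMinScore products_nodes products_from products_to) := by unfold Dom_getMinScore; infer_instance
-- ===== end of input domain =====

-- B builds the adjacency index once and enumerates triangles by per-edge neighbor-set
-- intersection instead of A's rescan of the whole products_from list for every edge.


-- Python's running minimum against an accumulator that starts at float('inf'):
-- `acc = v if acc is inf/None else min(v, acc)` (none models the initial infinity).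
-- Both Pythons update their running minimum exactly like this.
def pyMinAcc (v : Int) (acc : Option Int) : Option Int :=
  match acc with
  | none => some v
  | some cur => some (min v cur)

-- ===== PORT A =====
-- `map` (the defaultdict(set) built by the first loop) is inlined at each of its uses;
-- reading map[k] as getD k [] is exact here: defaultdict's silent insertion of empty
-- sets on read is unobservable in the result.
def getMinScore (products_nodes : Int) (products_from : List Int) (products_to : List Int) : Int :=
  match
    (PySem.List.pyRange 0 (products_from.length : Int) 1).foldl (fun acc i =>
      products_from.foldl (fun acc node =>
        if node ∈ (((PySem.List.pyRange 0 (products_from.length : Int) 1).foldl (fun m i =>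
                (m.modify (PySem.List.pyGetD products_from i 0) [] (fun s => PySem.Set.add s (PySem.List.pyGetD products_to i 0))).modify
                  (PySem.List.pyGetD products_to i 0) [] (fun s => PySem.Set.add s (PySem.List.pyGetD products_from i 0)))
              PySem.Dict.empty).getD (PySem.List.pyGetD products_from i 0) []) ∧
           node ∈ (((PySem.List.pyRange 0 (products_from.length : Int) 1).foldl (fun m i =>
                (m.modify (PySem.List.pyGetD products_from i 0) [] (fun s => PySem.Set.add s (PySem.List.pyGetD products_to i 0))).modify
                  (PySem.List.pyGetD products_to i 0) [] (fun s => PySem.Set.add s (PySem.List.pyGetD products_from i 0)))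
              PySem.Dict.empty).getD (PySem.List.pyGetD products_to i 0) []) then
          pyMinAcc
            (((((PySem.List.pyRange 0 (products_from.length : Int) 1).foldl (fun m i =>
                  (m.modify (PySem.List.pyGetD products_from i 0) [] (fun s => PySem.Set.add s (PySem.List.pyGetD products_to i 0))).modify
                    (PySem.List.pyGetD products_to i 0) [] (fun s => PySem.Set.add s (PySem.List.pyGetD products_from i 0)))
                PySem.Dict.empty).getD (PySem.List.pyGetD products_from i 0) []).length : Int) +
             ((((PySem.List.pyRange 0 (products_from.length : Int) 1).foldl (fun m i =>
                  (m.modify (PySem.List.pyGetD products_from i 0) [] (fun s => PySem.Set.add s (PySem.List.pyGetD products_to i 0))).modify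
                    (PySem.List.pyGetD products_to i 0) [] (fun s => PySem.Set.add s (PySem.List.pyGetD products_from i 0)))
                PySem.Dict.empty).getD (PySem.List.pyGetD products_to i 0) []).length : Int) +
             ((((PySem.List.pyRange 0 (products_from.length : Int) 1).foldl (fun m i =>
                  (m.modify (PySem.List.pyGetD products_from i 0) [] (fun s => PySem.Set.add s (PySem.List.pyGetD products_to i 0))).modify
                    (PySem.List.pyGetD products_to i 0) [] (fun s => PySem.Set.add s (PySem.List.pyGetD products_from i 0)))
                PySem.Dict.empty).getD node []).length : Int) - 6)
            acc
        else acc) acc) none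
  with
  | none => -1
  | some s => s

-- ===== PORT B =====
-- adj = {}; for u, v in zip(...): adj.setdefault(u, set()).add(v); adj.setdefault(v, set()).add(u)
-- (adj is likewise inlined at each of its uses)
def getMinScore_alt (products_nodes : Int) (products_from : List Int) (products_to : List Int) : Int :=
  match
    ((products_from.zip products_to).foldl (fun d p =>
        (d.modify p.1 [] (fun s => PySem.Set.add s p.2)).modify p.2 [] (fun s => PySem.Set.add s p.1))
      PySem.Dict.empty).items.foldl (fun best it =>
      it.2.foldl (fun best v =>
        (it.2.filter (fun w =>
            (((products_from.zip products_to).foldl (fun d p =>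
                (d.modify p.1 [] (fun s => PySem.Set.add s p.2)).modify p.2 [] (fun s => PySem.Set.add s p.1))
              PySem.Dict.empty).getD v []).contains w)).foldl (fun best w =>
          pyMinAcc
            ((it.2.length : Int) +
             ((((products_from.zip products_to).foldl (fun d p =>
                  (d.modify p.1 [] (fun s => PySem.Set.add s p.2)).modify p.2 [] (fun s => PySem.Set.add s p.1))
                PySem.Dict.empty).getD v []).length : Int) +
             ((((products_from.zip products_to).foldl (fun d p =>
                  (d.modify p.1 [] (fun s => PySem.Set.add s p.2)).modify p.2 [] (fun s => PySem.Set.add s p.1))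
                PySem.Dict.empty).getD w []).length : Int) - 6)
            best) best) best) none
  with
  | none => -1
  | some b => b

-- ===== PRECONDITION & SPEC =====
-- A indexes products_to at every position of products_from: it raises IndexError when
-- products_to is shorter, and returns on every other input.
def Pre_getMinScore (products_nodes : Int) (products_from : List Int) (products_to : List Int) : Prop :=
  products_from.length ≤ products_to.length
instance (products_nodes : Int) (products_from : List Int) (products_to : List Int) : Decidable (Pre_getMinScore products_nodes products_from products_to) := by unfold Pre_getMinScore; infer_instance
def pvWitness_getMinScore : Int × List Int × List Int := (4, [1, 2, 3], [2, 3, 1])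
def Spec_getMinScore (products_nodes : Int) (products_from : List Int) (products_to : List Int) (out : Int) : Prop := out = getMinScore_alt products_nodes products_from products_to
instance (products_nodes : Int) (products_from : List Int) (products_to : List Int) (out : Int) : Decidable (Spec_getMinScore products_nodes products_from products_to out) := by unfold Spec_getMinScore; infer_instance

-- ===== CLAIM (what is proved, stated in full; the proofs are below) =====
def Claim_equal_getMinScore : Prop := ∀ (products_nodes : Int) (products_from : List Int) (products_to : List Int), Dom_getMinScore products_nodes products_from products_to → Pre_getMinScore products_nodes products_from products_to → Spec_getMinScore products_nodes products_from products_to (getMinScore products_nodes products_from products_to)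

-- ===== LEMMAS AND PROOFS =====

-- `acc` holds the minimum of the set `S` of scores seen so far (none = S empty)
def OMin (S : Int → Prop) : Option Int → Prop
  | none => ∀ s, ¬ S s
  | some m => S m ∧ ∀ s, S s → m ≤ s

lemma OMin_congr {S T : Int → Prop} {a : Option Int} (h : ∀ s, S s ↔ T s) (hA : OMin S a) : OMin T a := by
  cases a with
  | none => intro s hs; exact hA s ((h s).mpr hs)
  | some m => exact ⟨(h m).mp hA.1, fun s hs => hA.2 s ((h s).mpr hs)⟩

lemma OMin_unique {S : Int → Prop} {a b : Option Int} (ha : OMin S a) (hb : OMin S b) : a = b := by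
  cases a with
  | none =>
    cases b with
    | none => rfl
    | some mb => exact absurd hb.1 (ha mb)
  | some ma =>
    cases b with
    | none => exact absurd ha.1 (hb ma)
    | some mb => exact congrArg some (le_antisymm (ha.2 mb hb.1) (hb.2 ma ha.1))

lemma OMin_upd {S : Int → Prop} {acc : Option Int} (v : Int) (h : OMin S acc) :
    OMin (fun s => S s ∨ s = v) (pyMinAcc v acc) := by
  cases acc with
  | none =>
    show OMin _ (some v)
    refine ⟨Or.inr rfl, fun s hs => ?_⟩
    rcases hs with hs | hs
    · exact absurd hs (h s)
    · exact le_of_eq hs.symm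
  | some cur =>
    show OMin _ (some (min v cur))
    constructor
    · rcases le_total v cur with hle | hle
      · exact Or.inr (min_eq_left hle)
      · exact Or.inl (by rw [min_eq_right hle]; exact h.1)
    · intro s hs
      rcases hs with hs | hs
      · exact le_trans (min_le_right v cur) (h.2 s hs)
      · exact hs ▸ min_le_left v cur

-- a fold whose step extends the score set by `P x` extends it by `∃ x ∈ l, P x`
lemma OMin_foldl {α : Type} (step : Option Int → α → Option Int) (P : α → Int → Prop)
    (hstep : ∀ (S : Int → Prop) (acc : Option Int) (x : α), OMin S acc → OMin (fun s => S s ∨ P x s) (step acc x)) :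
    ∀ (l : List α) (S : Int → Prop) (acc : Option Int), OMin S acc →
      OMin (fun s => S s ∨ ∃ x ∈ l, P x s) (l.foldl step acc) := by
  intro l
  induction l with
  | nil => intro S acc h; simp only [List.foldl_nil]; exact OMin_congr (by simp) h
  | cons x t ih =>
    intro S acc h
    have h2 := ih _ _ (hstep S acc x h)
    refine OMin_congr (fun s => ?_) h2
    simp only [List.mem_cons]
    constructor
    · rintro ((hs | hs) | ⟨y, hy, hp⟩)
      · exact Or.inl hs
      · exact Or.inr ⟨x, Or.inl rfl, hs⟩
      · exact Or.inr ⟨y, Or.inr hy, hp⟩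
    · rintro (hs | ⟨y, (rfl | hy), hp⟩)
      · exact Or.inl (Or.inl hs)
      · exact Or.inl (Or.inr hp)
      · exact Or.inr ⟨y, hy, hp⟩

-- A's inner conditional step
lemma OMin_step {α : Type} (C : α → Prop) [DecidablePred C] (f : α → Int)
    {S : Int → Prop} {acc : Option Int} (x : α) (h : OMin S acc) :
    OMin (fun s => S s ∨ (C x ∧ s = f x)) (if C x then pyMinAcc (f x) acc else acc) := by
  split_ifs with hc
  · exact OMin_congr (fun s => by tauto) (OMin_upd (f x) h)
  · exact OMin_congr (fun s => by tauto) h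

-- the shared adjacency build step (both ports fold this over the zipped edge list)
def dstep (d : PySem.Dict Int (PySem.Set Int)) (p : Int × Int) : PySem.Dict Int (PySem.Set Int) :=
  (d.modify p.1 [] (fun s => PySem.Set.add s p.2)).modify p.2 [] (fun s => PySem.Set.add s p.1)

def adjD (L : List (Int × Int)) : PySem.Dict Int (PySem.Set Int) :=
  L.foldl dstep PySem.Dict.empty

-- membership in the built neighbor sets = edge (in either direction) in the list
lemma mem_dstep_foldl (L : List (Int × Int)) :
    ∀ (d : PySem.Dict Int (PySem.Set Int)) (u v : Int),
      v ∈ (L.foldl dstep d).getD u [] ↔ v ∈ d.getD u [] ∨ (u, v) ∈ L ∨ (v, u) ∈ L := by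
  induction L with
  | nil => intro d u v; simp
  | cons p t ih =>
    intro d u v
    obtain ⟨a, b⟩ := p
    rw [List.foldl_cons, ih]
    have hd : v ∈ (dstep d (a, b)).getD u [] ↔ v ∈ d.getD u [] ∨ (u = a ∧ v = b) ∨ (u = b ∧ v = a) := by
      simp only [dstep, PySem.Dict.getD_modify]
      by_cases hab : b = a
      · subst hab
        by_cases hua : u = b <;> simp [hua, PySem.Set.mem_add]
      · have hba : ¬ a = b := fun hh => hab hh.symm
        by_cases hub : u = b <;> by_cases hua : u = a <;>
          simp [hub, hua, hab, hba, PySem.Set.mem_add]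
    rw [hd]
    simp only [List.mem_cons, Prod.ext_iff]
    tauto

lemma nodup_keys_adjD (L : List (Int × Int)) : (adjD L).keys.Nodup := by
  rw [adjD]
  have h : ∀ (d : PySem.Dict Int (PySem.Set Int)), d.keys.Nodup → (L.foldl dstep d).keys.Nodup := by
    induction L with
    | nil => intro d h; exact h
    | cons p t ih =>
      intro d h
      refine ih _ ?_
      have h1 : (d.modify p.1 [] (fun s => PySem.Set.add s p.2)).keys.Nodup := by
        rw [PySem.Dict.keys_modify]; exact PySem.Dict.nodup_keys_insert d _ _ h
      rw [dstep, PySem.Dict.keys_modify]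
      exact PySem.Dict.nodup_keys_insert _ _ _ h1
  exact h _ PySem.Dict.nodup_keys_empty

-- adjacency and triangle scores of the graph of the edge list L
def AdjOf (L : List (Int × Int)) (u v : Int) : Prop := v ∈ (adjD L).getD u []

lemma adjOf_iff (L : List (Int × Int)) (u v : Int) : AdjOf L u v ↔ (u, v) ∈ L ∨ (v, u) ∈ L := by
  rw [AdjOf, adjD, mem_dstep_foldl]; simp

lemma adjOf_symm (L : List (Int × Int)) (u v : Int) : AdjOf L u v ↔ AdjOf L v u := by
  rw [adjOf_iff, adjOf_iff]; tauto

def scOf (L : List (Int × Int)) (u v w : Int) : Int :=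
  (((adjD L).getD u []).length : Int) + (((adjD L).getD v []).length : Int) +
    (((adjD L).getD w []).length : Int) - 6

lemma scOf_comm_12 (L : List (Int × Int)) (u v w : Int) : scOf L u v w = scOf L v u w := by
  unfold scOf; ring

lemma scOf_comm_23 (L : List (Int × Int)) (u v w : Int) : scOf L u v w = scOf L u w v := by
  unfold scOf; ring

-- "s is the degree-sum score of some triangle of the graph of L"
def TriScore (L : List (Int × Int)) (s : Int) : Prop :=
  ∃ u v w, AdjOf L u v ∧ AdjOf L u w ∧ AdjOf L v w ∧ s = scOf L u v w

-- the two loop results, over the zipped edge list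
def minA (pf pt : List Int) : Option Int :=
  (pf.zip pt).foldl (fun acc p =>
    pf.foldl (fun acc node =>
      if node ∈ (adjD (pf.zip pt)).getD p.1 [] ∧ node ∈ (adjD (pf.zip pt)).getD p.2 [] then
        pyMinAcc (scOf (pf.zip pt) p.1 p.2 node) acc
      else acc) acc) none

def minB (pf pt : List Int) : Option Int :=
  (adjD (pf.zip pt)).items.foldl (fun best it =>
    it.2.foldl (fun best v =>
      (it.2.filter (fun w => ((adjD (pf.zip pt)).getD v []).contains w)).foldl (fun best w =>
        pyMinAcc ((it.2.length : Int) + (((adjD (pf.zip pt)).getD v []).length : Int) +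
          (((adjD (pf.zip pt)).getD w []).length : Int) - 6) best) best) best) none

-- a Python index loop reading pf[i] and pt[i] is the fold over the zipped lists
lemma foldl_pyRange_zip {σ : Type} (pf pt : List Int) (h : pf.length ≤ pt.length)
    (f : σ → Int → Int → σ) (init : σ) :
    (PySem.List.pyRange 0 (pf.length : Int) 1).foldl
        (fun a i => f a (PySem.List.pyGetD pf i 0) (PySem.List.pyGetD pt i 0)) init
      = (pf.zip pt).foldl (fun a p => f a p.1 p.2) init := by
  rw [PySem.List.pyRange_zero_nat, List.foldl_map]
  simp only [PySem.List.pyGetD_natCast]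
  induction pf generalizing pt init with
  | nil => simp
  | cons x xs ih =>
    cases pt with
    | nil => simp at h
    | cons y ys =>
      simp only [List.length_cons]
      rw [List.range_succ_eq_map, List.foldl_cons, List.foldl_map]
      simp only [List.getD_cons_zero, List.getD_cons_succ, List.zip_cons_cons, List.foldl_cons]
      exact ih ys (by simpa using h) (f init x y)

lemma portA_eq (pn : Int) (pf pt : List Int) (hpre : pf.length ≤ pt.length) :
    getMinScore pn pf pt = match minA pf pt with | none => -1 | some s => s := by
  unfold getMinScore
  rw [foldl_pyRange_zip pf pt hpre
    (fun m u v => (m.modify u [] (fun s => PySem.Set.add s v)).modify v [] (fun s => PySem.Set.add s u))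
    PySem.Dict.empty]
  rw [foldl_pyRange_zip pf pt hpre
    (fun acc u v =>
      pf.foldl (fun acc node =>
        if node ∈ (List.foldl (fun a p => (a.modify p.1 [] fun s => PySem.Set.add s p.2).modify p.2 [] fun s => PySem.Set.add s p.1) PySem.Dict.empty (pf.zip pt)).getD u [] ∧
           node ∈ (List.foldl (fun a p => (a.modify p.1 [] fun s => PySem.Set.add s p.2).modify p.2 [] fun s => PySem.Set.add s p.1) PySem.Dict.empty (pf.zip pt)).getD v [] then
          pyMinAcc
            (((List.foldl (fun a p => (a.modify p.1 [] fun s => PySem.Set.add s p.2).modify p.2 [] fun s => PySem.Set.add s p.1) PySem.Dict.empty (pf.zip pt)).getD u []).length +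
              ((List.foldl (fun a p => (a.modify p.1 [] fun s => PySem.Set.add s p.2).modify p.2 [] fun s => PySem.Set.add s p.1) PySem.Dict.empty (pf.zip pt)).getD v []).length +
              ((List.foldl (fun a p => (a.modify p.1 [] fun s => PySem.Set.add s p.2).modify p.2 [] fun s => PySem.Set.add s p.1) PySem.Dict.empty (pf.zip pt)).getD node []).length - 6) acc
        else acc) acc)
    none]
  rfl

lemma portB_eq (pn : Int) (pf pt : List Int) :
    getMinScore_alt pn pf pt = match minB pf pt with | none => -1 | some b => b := rfl

-- ===== the two OMin characterizations =====

lemma OMin_minA (pf pt : List Int) :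
    OMin (fun s => ∃ p ∈ pf.zip pt, ∃ node ∈ pf,
            (node ∈ (adjD (pf.zip pt)).getD p.1 [] ∧ node ∈ (adjD (pf.zip pt)).getD p.2 []) ∧
            s = scOf (pf.zip pt) p.1 p.2 node)
      (minA pf pt) := by
  have h := OMin_foldl _
    (fun (p : Int × Int) s => ∃ node ∈ pf,
        (node ∈ (adjD (pf.zip pt)).getD p.1 [] ∧ node ∈ (adjD (pf.zip pt)).getD p.2 []) ∧
        s = scOf (pf.zip pt) p.1 p.2 node)
    (fun S acc p hS => by
      exact OMin_foldl _
        (fun (node : Int) s =>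
          (node ∈ (adjD (pf.zip pt)).getD p.1 [] ∧ node ∈ (adjD (pf.zip pt)).getD p.2 []) ∧
          s = scOf (pf.zip pt) p.1 p.2 node)
        (fun S acc node hS => OMin_step
          (fun node => node ∈ (adjD (pf.zip pt)).getD p.1 [] ∧ node ∈ (adjD (pf.zip pt)).getD p.2 [])
          (fun node => scOf (pf.zip pt) p.1 p.2 node) node hS)
        pf S acc hS)
    (pf.zip pt) _ none (fun s hs => hs)
  exact OMin_congr (fun s => by tauto) h

lemma OMin_minB (pf pt : List Int) :
    OMin (fun s => ∃ it ∈ (adjD (pf.zip pt)).items, ∃ v ∈ it.2,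
            ∃ w ∈ it.2.filter (fun w => ((adjD (pf.zip pt)).getD v []).contains w),
            s = (it.2.length : Int) + (((adjD (pf.zip pt)).getD v []).length : Int) +
                (((adjD (pf.zip pt)).getD w []).length : Int) - 6)
      (minB pf pt) := by
  have h := OMin_foldl _
    (fun (it : Int × PySem.Set Int) s => ∃ v ∈ it.2,
        ∃ w ∈ it.2.filter (fun w => ((adjD (pf.zip pt)).getD v []).contains w),
        s = (it.2.length : Int) + (((adjD (pf.zip pt)).getD v []).length : Int) +
            (((adjD (pf.zip pt)).getD w []).length : Int) - 6)
    (fun S acc it hS => by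
      exact OMin_foldl _
        (fun (v : Int) s =>
            ∃ w ∈ it.2.filter (fun w => ((adjD (pf.zip pt)).getD v []).contains w),
            s = (it.2.length : Int) + (((adjD (pf.zip pt)).getD v []).length : Int) +
                (((adjD (pf.zip pt)).getD w []).length : Int) - 6)
        (fun S acc v hS => by
          have h3 := OMin_foldl _
            (fun (w : Int) s =>
                s = (it.2.length : Int) + (((adjD (pf.zip pt)).getD v []).length : Int) +
                    (((adjD (pf.zip pt)).getD w []).length : Int) - 6)
            (fun S acc w hS => OMin_upd _ hS)
            (it.2.filter (fun w => ((adjD (pf.zip pt)).getD v []).contains w)) S acc hS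
          exact h3)
        it.2 S acc hS)
    (adjD (pf.zip pt)).items _ none (fun s hs => hs)
  exact OMin_congr (fun s => by tauto) h

-- ===== both score sets are the triangle-score set =====

lemma SA_iff_Tri (pf pt : List Int) (s : Int) :
    (∃ p ∈ pf.zip pt, ∃ node ∈ pf,
        (node ∈ (adjD (pf.zip pt)).getD p.1 [] ∧ node ∈ (adjD (pf.zip pt)).getD p.2 []) ∧
        s = scOf (pf.zip pt) p.1 p.2 node)
      ↔ TriScore (pf.zip pt) s := by
  constructor
  · rintro ⟨⟨a, b⟩, hp, node, _hnode, ⟨h1, h2⟩, rfl⟩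
    exact ⟨a, b, node, (adjOf_iff _ a b).mpr (Or.inl hp), h1, h2, rfl⟩
  · rintro ⟨u, v, w, huv, huw, hvw, rfl⟩
    rcases (adjOf_iff _ u w).mp huw with hwu | hwu
    · -- (u, w) ∈ L
      rcases (adjOf_iff _ v w).mp hvw with hwv | hwv
      · -- also (v, w) ∈ L : use edge (u, w) with node v
        refine ⟨(u, w), hwu, v, (List.of_mem_zip hwv).1, ⟨huv, (adjOf_symm _ v w).mp hvw⟩, ?_⟩
        exact scOf_comm_23 _ u v w
      · -- (w, v) ∈ L : w ∈ pf; use the u-v edge with node w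
        rcases (adjOf_iff _ u v).mp huv with he | he
        · exact ⟨(u, v), he, w, (List.of_mem_zip hwv).1, ⟨huw, hvw⟩, rfl⟩
        · exact ⟨(v, u), he, w, (List.of_mem_zip hwv).1, ⟨hvw, huw⟩, scOf_comm_12 _ u v w⟩
    · -- (w, u) ∈ L : w ∈ pf; use the u-v edge with node w
      rcases (adjOf_iff _ u v).mp huv with he | he
      · exact ⟨(u, v), he, w, (List.of_mem_zip hwu).1, ⟨huw, hvw⟩, rfl⟩
      · exact ⟨(v, u), he, w, (List.of_mem_zip hwu).1, ⟨hvw, huw⟩, scOf_comm_12 _ u v w⟩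

lemma SB_iff_Tri (pf pt : List Int) (s : Int) :
    (∃ it ∈ (adjD (pf.zip pt)).items, ∃ v ∈ it.2,
        ∃ w ∈ it.2.filter (fun w => ((adjD (pf.zip pt)).getD v []).contains w),
        s = (it.2.length : Int) + (((adjD (pf.zip pt)).getD v []).length : Int) +
            (((adjD (pf.zip pt)).getD w []).length : Int) - 6)
      ↔ TriScore (pf.zip pt) s := by
  have hnd := nodup_keys_adjD (pf.zip pt)
  constructor
  · rintro ⟨⟨u, nu⟩, hit, v, hv, w, hw, rfl⟩
    have hget : (adjD (pf.zip pt)).getD u [] = nu := by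
      rw [PySem.Dict.getD_eq_get?_getD, PySem.Dict.get?_of_mem_items _ hit hnd]; rfl
    rw [List.mem_filter] at hw
    refine ⟨u, v, w, ?_, ?_, ?_, ?_⟩
    · rw [AdjOf, hget]; exact hv
    · rw [AdjOf, hget]; exact hw.1
    · rw [AdjOf]; simpa using hw.2
    · rw [scOf, hget]
  · rintro ⟨u, v, w, huv, huw, hvw, rfl⟩
    have hne : (adjD (pf.zip pt)).get? u = some ((adjD (pf.zip pt)).getD u []) := by
      rcases hg : (adjD (pf.zip pt)).get? u with _ | nu
      · exfalso
        rw [AdjOf, PySem.Dict.getD_eq_get?_getD, hg] at huv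
        simp at huv
      · rw [PySem.Dict.getD_eq_get?_getD, hg]; rfl
    refine ⟨(u, (adjD (pf.zip pt)).getD u []),
      PySem.Dict.mem_items_of_get?_eq_some _ hne, v, huv, w, ?_, by rw [scOf]⟩
    rw [List.mem_filter]
    exact ⟨huw, by simpa using hvw⟩

-- ===== VERDICT (by name: the statement is the Claim_ definition above) =====
theorem getMinScore_spec : Claim_equal_getMinScore := by
  intro pn pf pt _hdom hpre
  unfold Spec_getMinScore
  rw [portA_eq pn pf pt hpre, portB_eq pn pf pt]
  have hA := OMin_congr (SA_iff_Tri pf pt) (OMin_minA pf pt)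
  have hB := OMin_congr (SB_iff_Tri pf pt) (OMin_minB pf pt)
  rw [OMin_unique hA hB]
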